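-- pv_equiv track=rewrite | github.com/btheard3/ai-content-studio | creative_writer/agent.py | _extract_fallback_draft
-- ===== SOURCE A (Python) =====
-- def _extract_fallback_draft(content: str) -> str:
--     """Extract creative draft when regex fails"""
--     # Try to find the first substantial paragraph
--     lines = content.split('\n')
--     substantial_content = []
--
--     for line in lines:
--         line = line.strip()
--         if line and len(line) > 50 and not line.isupper():
--             substantial_content.append(line)
--             if len(' '.join(substantial_content)) > 200:
--                 break
--
--     if substantial_content:
--         return ' '.join(substantial_content)
--
--     # Last resort: take first 300 words
--     words = content.split()[:300]
--     return ' '.join(words) if words else "Creative content generation failed."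
-- ===== SOURCE B (Python) =====
-- def _extract_fallback_draft(content: str) -> str:
--     """Extract creative draft when regex fails"""
--     # Collect every substantial line first, then grow the draft until it is long enough.
--     subs = [s for line in content.split('\n')
--             if (s := line.strip()) and len(s) > 50 and not s.isupper()]
--     if subs:
--         draft = subs[0]
--         for s in subs[1:]:
--             if len(draft) > 200:
--                 break
--             draft += ' ' + s
--         return draft
--
--     # Last resort: take first 300 words
--     words = content.split()[:300]
--     return ' '.join(words) if words else "Creative content generation failed."
-- ===== Notes on version B (the rewrite author's own statement) =====
-- stated objective: alternative
-- what changed: A interleaves filtering and the 200-char cutoff in one loop that appends to a list and re-joins it on every step to test the threshold; B first collects all substantial lines with a comprehension and then grows the draft string directly, stopping once it is longer than 200 characters, so no list of kept lines and no repeated joins exist.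
import Mathlib
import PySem

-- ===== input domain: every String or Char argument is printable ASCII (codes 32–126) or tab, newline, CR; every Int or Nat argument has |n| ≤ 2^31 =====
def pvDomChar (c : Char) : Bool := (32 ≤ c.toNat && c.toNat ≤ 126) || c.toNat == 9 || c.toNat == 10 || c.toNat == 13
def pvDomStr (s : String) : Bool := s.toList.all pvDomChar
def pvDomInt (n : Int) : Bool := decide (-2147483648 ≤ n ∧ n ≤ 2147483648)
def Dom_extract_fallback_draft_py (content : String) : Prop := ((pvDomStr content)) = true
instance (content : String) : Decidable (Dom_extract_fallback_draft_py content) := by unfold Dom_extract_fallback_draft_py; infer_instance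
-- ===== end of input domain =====

-- B collects the substantial lines with one comprehension and then grows the draft string
-- directly until it passes 200 characters (no kept-lines list, no repeated joins).

-- hand port of Python str.isupper(), exact on the ASCII domain: at least one cased
-- character and no lowercase one (ASCII cased characters = letters)
def pyStrIsUpper (s : String) : Bool :=
  s.toList.any (fun c => PySem.Chars.isalpha c) && s.toList.all (fun c => !PySem.Chars.islower c)

-- the substantiality test 'line and len(line) > 50 and not line.isupper()' (both Pythons)
def pvCond (s : String) : Bool :=
  (s != "") && (decide ((50 : Int) < PySem.Str.len s)) && (!pyStrIsUpper s)

-- the identical "last resort" tail of both Pythons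
def pvFallback (content : String) : String :=
  let words := (PySem.Str.split₀ content).take 300
  if words != [] then PySem.Str.join " " words else "Creative content generation failed."

-- ===== PORT A =====
-- A's for-loop with break, over (remaining lines, substantial_content)
def pvLoopA : List String → List String → List String
  | [], acc => acc
  | l :: rest, acc =>
    let s := PySem.Str.strip l
    if pvCond s then
      let acc' := acc ++ [s]
      if (200 : Int) < PySem.Str.len (PySem.Str.join " " acc') then acc' else pvLoopA rest acc'
    else pvLoopA rest acc

def extract_fallback_draft_py (content : String) : String :=
  let sc := pvLoopA ((PySem.Str.split? content "\n").getD []) []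
  if sc != [] then PySem.Str.join " " sc else pvFallback content

-- ===== PORT B =====
-- B's comprehension filter: the stripped line when substantial
def pvFilt (l : String) : Option String :=
  let s := PySem.Str.strip l
  if pvCond s then some s else none

-- B's for-loop over subs[1:] with break, growing the draft string
def pvLoopB : String → List String → String
  | d, [] => d
  | d, s :: r => if (200 : Int) < PySem.Str.len d then d else pvLoopB (d ++ " " ++ s) r

def extract_fallback_draft_py_alt (content : String) : String :=
  let subs := ((PySem.Str.split? content "\n").getD []).filterMap pvFilt
  match subs with
  | s0 :: rest => pvLoopB s0 rest
  | [] => pvFallback content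

-- ===== PRECONDITION & SPEC =====
def Spec_extract_fallback_draft_py (content : String) (out : String) : Prop := out = extract_fallback_draft_py_alt content
instance (content : String) (out : String) : Decidable (Spec_extract_fallback_draft_py content out) := by unfold Spec_extract_fallback_draft_py; infer_instance

-- ===== CLAIM (what is proved, stated in full; the proofs are below) =====
def Claim_equal_extract_fallback_draft_py : Prop := ∀ (content : String), Dom_extract_fallback_draft_py content → Spec_extract_fallback_draft_py content (extract_fallback_draft_py content)

-- ===== LEMMAS AND PROOFS =====

-- len of ' '.join
def pvJ (l : List String) : Int := PySem.Str.len (PySem.Str.join " " l)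

lemma pv_toList_inj {s t : String} (h : s.toList = t.toList) : s = t :=
  String.toList_inj.mp h

lemma pv_join_append_singleton (sep : List Char) (l : List (List Char)) (x : List Char)
    (h : l ≠ []) : PySem.Chars.join sep (l ++ [x]) = PySem.Chars.join sep l ++ sep ++ x := by
  induction l with
  | nil => exact absurd rfl h
  | cons a r ih =>
    cases r with
    | nil => simp [PySem.Chars.join_cons_cons, PySem.Chars.join_singleton]
    | cons b r' =>
      rw [List.cons_append, List.cons_append, PySem.Chars.join_cons_cons, ← List.cons_append,
        ih (by simp), PySem.Chars.join_cons_cons]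
      simp [List.append_assoc]

lemma pvJ_singleton (s : String) : pvJ [s] = PySem.Str.len s := by
  simp [pvJ, PySem.Str.len_eq, PySem.Str.toList_join, PySem.Chars.join_singleton]

lemma pvJ_append_singleton (l : List String) (s : String) (h : l ≠ []) :
    pvJ (l ++ [s]) = pvJ l + PySem.Str.len s + 1 := by
  simp only [pvJ, PySem.Str.len_eq, PySem.Str.toList_join, List.map_append, List.map_cons,
    List.map_nil]
  rw [pv_join_append_singleton _ _ _ (by simpa using h), List.length_append, List.length_append]
  have h1 : (" " : String).toList.length = 1 := by decide
  rw [h1]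
  push_cast
  ring

-- the common greedy prefix: starting cumulative length t, take lines until it exceeds 200
def pvTake200 : List String → Int → List String
  | [], _ => []
  | s :: r, t =>
    s :: (if (200 : Int) < t + PySem.Str.len s + 1 then [] else pvTake200 r (t + PySem.Str.len s + 1))

def pvT (acc : List String) : Int := if acc = [] then -1 else pvJ acc

lemma pvT_append_singleton (acc : List String) (s : String) :
    pvJ (acc ++ [s]) = pvT acc + PySem.Str.len s + 1 := by
  cases acc with
  | nil => simp [pvT, pvJ_singleton]
  | cons a r => rw [pvJ_append_singleton _ _ (by simp), pvT]; simp

lemma pvT_snoc (acc : List String) (s : String) :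
    pvT (acc ++ [s]) = pvT acc + PySem.Str.len s + 1 := by
  rw [pvT, if_neg (by simp)]; exact pvT_append_singleton acc s

lemma pvFilt_pos (l : String) (hc : pvCond (PySem.Str.strip l) = true) :
    pvFilt l = some (PySem.Str.strip l) := by simp [pvFilt, hc]

lemma pvFilt_neg (l : String) (hc : pvCond (PySem.Str.strip l) = false) :
    pvFilt l = none := by simp [pvFilt, hc]

lemma pvLoopA_eq (lines : List String) : ∀ acc,
    pvLoopA lines acc = acc ++ pvTake200 (lines.filterMap pvFilt) (pvT acc) := by
  induction lines with
  | nil => intro acc; simp [pvLoopA, pvTake200]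
  | cons l rest ih =>
    intro acc
    simp only [pvLoopA, List.filterMap_cons]
    by_cases hc : pvCond (PySem.Str.strip l) = true
    · rw [if_pos hc, pvFilt_pos l hc]
      have hJ : PySem.Str.len (PySem.Str.join " " (acc ++ [PySem.Str.strip l]))
          = pvT acc + PySem.Str.len (PySem.Str.strip l) + 1 := pvT_append_singleton acc _
      rw [hJ]
      simp only [pvTake200]
      by_cases hb : (200 : Int) < pvT acc + PySem.Str.len (PySem.Str.strip l) + 1
      · rw [if_pos hb]; try rw [if_pos hb]
      · rw [if_neg hb, if_neg hb, ih (acc ++ [PySem.Str.strip l]), pvT_snoc]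
        try simp
    · rw [if_neg hc, pvFilt_neg l (by simpa using hc), ih]
      try simp

-- the checked-before-include tail of the greedy prefix
def pvTail : List String → Int → List String
  | [], _ => []
  | s :: r, t =>
    if (200 : Int) < t then [] else s :: pvTail r (t + PySem.Str.len s + 1)

lemma pvTail_eq (r : List String) : ∀ t : Int,
    pvTail r t = if (200 : Int) < t then [] else pvTake200 r t := by
  induction r with
  | nil => intro t; simp [pvTake200, pvTail]
  | cons s r' ih =>
    intro t
    simp only [pvTake200, pvTail]
    by_cases hb : (200 : Int) < t
    · rw [if_pos hb, if_pos hb]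
    · rw [if_neg hb, if_neg hb, ih]

lemma pvTake200_cons (s : String) (r : List String) (t : Int) :
    pvTake200 (s :: r) t = s :: pvTail r (t + PySem.Str.len s + 1) := by
  rw [pvTail_eq]; rfl

lemma pv_join_single (d : String) : PySem.Str.join " " [d] = d := by
  apply pv_toList_inj
  simp [PySem.Str.toList_join, PySem.Chars.join_singleton]

lemma pv_toList_append (a b : String) : (a ++ b).toList = a.toList ++ b.toList :=
  String.toList_append

lemma pv_len_glue (d s : String) :
    PySem.Str.len (d ++ " " ++ s) = PySem.Str.len d + PySem.Str.len s + 1 := by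
  simp only [PySem.Str.len_eq, pv_toList_append, List.length_append]
  have h1 : (" " : String).toList.length = 1 := by decide
  rw [h1]; push_cast; ring

lemma pv_join_glue (d s : String) (l : List String) :
    PySem.Str.join " " (d :: s :: l) = PySem.Str.join " " ((d ++ " " ++ s) :: l) := by
  apply pv_toList_inj
  cases l with
  | nil =>
    simp only [PySem.Str.toList_join, List.map_cons, List.map_nil, pv_toList_append]
    rw [PySem.Chars.join_cons_cons, PySem.Chars.join_singleton, PySem.Chars.join_singleton]
  | cons b l' =>
    simp only [PySem.Str.toList_join, List.map_cons, pv_toList_append]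
    rw [PySem.Chars.join_cons_cons, PySem.Chars.join_cons_cons, PySem.Chars.join_cons_cons]
    simp [List.append_assoc]

lemma pvLoopB_eq (r : List String) : ∀ d : String,
    pvLoopB d r = PySem.Str.join " " (d :: pvTail r (PySem.Str.len d)) := by
  induction r with
  | nil => intro d; simp [pvLoopB, pvTail, pv_join_single]
  | cons s r' ih =>
    intro d
    simp only [pvLoopB, pvTail]
    by_cases hb : (200 : Int) < PySem.Str.len d
    · rw [if_pos hb, if_pos hb, pv_join_single]
    · rw [if_neg hb, if_neg hb, ih (d ++ " " ++ s), pv_join_glue, pv_len_glue]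

-- ===== VERDICT (by name: the statement is the Claim_ definition above) =====
theorem extract_fallback_draft_py_spec : Claim_equal_extract_fallback_draft_py := by
  intro content _
  unfold Spec_extract_fallback_draft_py
  simp only [extract_fallback_draft_py, extract_fallback_draft_py_alt]
  rw [pvLoopA_eq]
  rw [show pvT [] = (-1 : Int) from rfl, List.nil_append]
  cases hsubs : ((PySem.Str.split? content "\n").getD []).filterMap pvFilt with
  | nil => simp [pvTake200]
  | cons s0 rest =>
    rw [pvTake200_cons]
    have hne : ((s0 :: pvTail rest (-1 + PySem.Str.len s0 + 1)) != []) = true := by simp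
    rw [if_pos hne]
    show PySem.Str.join " " _ = pvLoopB s0 rest
    rw [pvLoopB_eq]
    have : (-1 : Int) + PySem.Str.len s0 + 1 = PySem.Str.len s0 := by ring
    rw [this]
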